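-- pv_equiv track=rewrite | github.com/mispython/AimanPython | Conv_Py/PBBELF.py | format_cacname
-- ===== SOURCE A (Python) =====
-- CACBRCH_MAP = {
--     'KL': [2, 18, 35, 38, 40, 41, 53, 66, 120, 124, 128, 129, 141, 148,
--            169, 170, 225, 226, 230, 232, 236, 248, 262, 267, 802, 812, 816, 818],
--     'CC': [3, 15, 19, 22, 26, 29, 36, 46, 56, 69, 83, 94, 96, 97, 701, 118, 122, 125,
--            131, 132, 136, 138, 145, 151, 155, 157, 162, 163, 270, 167, 168, 173, 178,
--            179, 195, 198, 180, 196, 197, 202, 220, 229, 241, 252, 280, 811, 815, 822,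
--            103, 821, 825, 269, 284, 285, 288, 289, 702],
--     'SJ': [27, 42, 60, 68, 88, 121, 154, 177, 204, 206, 255, 801, 826],
--     'PG': [6, 54, 107, 114, 126, 150, 159, 171, 205, 253, 265, 266, 808, 817],
--     'JB': [7, 37, 52, 59, 61, 79, 89, 105, 110, 147, 174, 176, 216, 217, 222, 286,
--            804, 805, 287, 290],
--     'KL2': [20, 25, 43, 78, 81, 92, 109, 127, 133, 135, 153, 199, 201, 203,
--             221, 240, 250, 268, 814, 820],
-- }
--
-- def format_cacname(branch_code: int) -> str:
--     """Format CAC name"""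
--     for key, branches in CACBRCH_MAP.items():
--         if branch_code in branches:
--             if key == 'KL':
--                 return 'CAC-K. LUMPUR '
--             elif key == 'CC':
--                 return 'CAC-CITY CENTRE'
--             elif key == 'SJ':
--                 return 'CAC-BUTTERWOTH'
--             elif key == 'PG':
--                 return 'CAC-PENANG'
--             elif key == 'JB':
--                 return 'CAC-JOHOR BAHRU'
--             elif key == 'KL2':
--                 return 'CAC-KELANG'
--     return 'NON CAC'
-- ===== SOURCE B (Python) =====
-- # Precomputed flat lookup table: branch code -> CAC branch name (codes are unique
-- # across the original grouped map, so a single dict captures the mapping exactly).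
-- BRANCH_CAC = {
--     2: 'CAC-K. LUMPUR ', 18: 'CAC-K. LUMPUR ', 35: 'CAC-K. LUMPUR ', 38: 'CAC-K. LUMPUR ',
--     40: 'CAC-K. LUMPUR ', 41: 'CAC-K. LUMPUR ', 53: 'CAC-K. LUMPUR ', 66: 'CAC-K. LUMPUR ',
--     120: 'CAC-K. LUMPUR ', 124: 'CAC-K. LUMPUR ', 128: 'CAC-K. LUMPUR ', 129: 'CAC-K. LUMPUR ',
--     141: 'CAC-K. LUMPUR ', 148: 'CAC-K. LUMPUR ', 169: 'CAC-K. LUMPUR ', 170: 'CAC-K. LUMPUR ',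
--     225: 'CAC-K. LUMPUR ', 226: 'CAC-K. LUMPUR ', 230: 'CAC-K. LUMPUR ', 232: 'CAC-K. LUMPUR ',
--     236: 'CAC-K. LUMPUR ', 248: 'CAC-K. LUMPUR ', 262: 'CAC-K. LUMPUR ', 267: 'CAC-K. LUMPUR ',
--     802: 'CAC-K. LUMPUR ', 812: 'CAC-K. LUMPUR ', 816: 'CAC-K. LUMPUR ', 818: 'CAC-K. LUMPUR ',
--     3: 'CAC-CITY CENTRE', 15: 'CAC-CITY CENTRE', 19: 'CAC-CITY CENTRE', 22: 'CAC-CITY CENTRE',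
--     26: 'CAC-CITY CENTRE', 29: 'CAC-CITY CENTRE', 36: 'CAC-CITY CENTRE', 46: 'CAC-CITY CENTRE',
--     56: 'CAC-CITY CENTRE', 69: 'CAC-CITY CENTRE', 83: 'CAC-CITY CENTRE', 94: 'CAC-CITY CENTRE',
--     96: 'CAC-CITY CENTRE', 97: 'CAC-CITY CENTRE', 701: 'CAC-CITY CENTRE', 118: 'CAC-CITY CENTRE',
--     122: 'CAC-CITY CENTRE', 125: 'CAC-CITY CENTRE', 131: 'CAC-CITY CENTRE',
--     132: 'CAC-CITY CENTRE', 136: 'CAC-CITY CENTRE', 138: 'CAC-CITY CENTRE',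
--     145: 'CAC-CITY CENTRE', 151: 'CAC-CITY CENTRE', 155: 'CAC-CITY CENTRE',
--     157: 'CAC-CITY CENTRE', 162: 'CAC-CITY CENTRE', 163: 'CAC-CITY CENTRE',
--     270: 'CAC-CITY CENTRE', 167: 'CAC-CITY CENTRE', 168: 'CAC-CITY CENTRE',
--     173: 'CAC-CITY CENTRE', 178: 'CAC-CITY CENTRE', 179: 'CAC-CITY CENTRE',
--     195: 'CAC-CITY CENTRE', 198: 'CAC-CITY CENTRE', 180: 'CAC-CITY CENTRE',
--     196: 'CAC-CITY CENTRE', 197: 'CAC-CITY CENTRE', 202: 'CAC-CITY CENTRE',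
--     220: 'CAC-CITY CENTRE', 229: 'CAC-CITY CENTRE', 241: 'CAC-CITY CENTRE',
--     252: 'CAC-CITY CENTRE', 280: 'CAC-CITY CENTRE', 811: 'CAC-CITY CENTRE',
--     815: 'CAC-CITY CENTRE', 822: 'CAC-CITY CENTRE', 103: 'CAC-CITY CENTRE',
--     821: 'CAC-CITY CENTRE', 825: 'CAC-CITY CENTRE', 269: 'CAC-CITY CENTRE',
--     284: 'CAC-CITY CENTRE', 285: 'CAC-CITY CENTRE', 288: 'CAC-CITY CENTRE',
--     289: 'CAC-CITY CENTRE', 702: 'CAC-CITY CENTRE', 27: 'CAC-BUTTERWOTH', 42: 'CAC-BUTTERWOTH',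
--     60: 'CAC-BUTTERWOTH', 68: 'CAC-BUTTERWOTH', 88: 'CAC-BUTTERWOTH', 121: 'CAC-BUTTERWOTH',
--     154: 'CAC-BUTTERWOTH', 177: 'CAC-BUTTERWOTH', 204: 'CAC-BUTTERWOTH', 206: 'CAC-BUTTERWOTH',
--     255: 'CAC-BUTTERWOTH', 801: 'CAC-BUTTERWOTH', 826: 'CAC-BUTTERWOTH', 6: 'CAC-PENANG',
--     54: 'CAC-PENANG', 107: 'CAC-PENANG', 114: 'CAC-PENANG', 126: 'CAC-PENANG', 150: 'CAC-PENANG',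
--     159: 'CAC-PENANG', 171: 'CAC-PENANG', 205: 'CAC-PENANG', 253: 'CAC-PENANG', 265: 'CAC-PENANG',
--     266: 'CAC-PENANG', 808: 'CAC-PENANG', 817: 'CAC-PENANG', 7: 'CAC-JOHOR BAHRU',
--     37: 'CAC-JOHOR BAHRU', 52: 'CAC-JOHOR BAHRU', 59: 'CAC-JOHOR BAHRU', 61: 'CAC-JOHOR BAHRU',
--     79: 'CAC-JOHOR BAHRU', 89: 'CAC-JOHOR BAHRU', 105: 'CAC-JOHOR BAHRU', 110: 'CAC-JOHOR BAHRU',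
--     147: 'CAC-JOHOR BAHRU', 174: 'CAC-JOHOR BAHRU', 176: 'CAC-JOHOR BAHRU',
--     216: 'CAC-JOHOR BAHRU', 217: 'CAC-JOHOR BAHRU', 222: 'CAC-JOHOR BAHRU',
--     286: 'CAC-JOHOR BAHRU', 804: 'CAC-JOHOR BAHRU', 805: 'CAC-JOHOR BAHRU',
--     287: 'CAC-JOHOR BAHRU', 290: 'CAC-JOHOR BAHRU', 20: 'CAC-KELANG', 25: 'CAC-KELANG',
--     43: 'CAC-KELANG', 78: 'CAC-KELANG', 81: 'CAC-KELANG', 92: 'CAC-KELANG', 109: 'CAC-KELANG',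
--     127: 'CAC-KELANG', 133: 'CAC-KELANG', 135: 'CAC-KELANG', 153: 'CAC-KELANG', 199: 'CAC-KELANG',
--     201: 'CAC-KELANG', 203: 'CAC-KELANG', 221: 'CAC-KELANG', 240: 'CAC-KELANG', 250: 'CAC-KELANG',
--     268: 'CAC-KELANG', 814: 'CAC-KELANG', 820: 'CAC-KELANG',
-- }
--
--
-- def format_cacname(branch_code: int) -> str:
--     """Format CAC name"""
--     return BRANCH_CAC.get(branch_code, 'NON CAC')
-- ===== Notes on version B (the rewrite author's own statement) =====
-- stated objective: faster
-- what changed: Replaces the per-call scan of six branch lists plus the if/elif key chain with one precomputed flat dict literal mapping each branch code directly to its CAC name (codes are unique across groups), so the function is a single dict lookup with a default.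
import Mathlib
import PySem

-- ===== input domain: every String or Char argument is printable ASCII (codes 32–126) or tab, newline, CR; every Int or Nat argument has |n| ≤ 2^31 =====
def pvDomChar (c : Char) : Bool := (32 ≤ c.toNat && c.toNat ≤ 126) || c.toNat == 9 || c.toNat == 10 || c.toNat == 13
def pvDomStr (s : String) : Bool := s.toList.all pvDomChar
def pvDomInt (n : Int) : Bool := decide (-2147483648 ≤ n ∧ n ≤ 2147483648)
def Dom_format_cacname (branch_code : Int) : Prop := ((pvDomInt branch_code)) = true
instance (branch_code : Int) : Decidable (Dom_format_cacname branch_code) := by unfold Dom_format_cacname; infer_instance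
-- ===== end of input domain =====

-- B replaces A's per-call scan of six code lists plus if/elif key chain with one
-- precomputed flat dict literal (branch code -> CAC name); a single O(1) lookup.

-- ===== PORT A =====
-- the six branch lists of the shared module constant CACBRCH_MAP
def pvKLb : List Int := [2, 18, 35, 38, 40, 41, 53, 66, 120, 124, 128, 129, 141, 148, 169, 170, 225, 226, 230, 232, 236, 248, 262, 267, 802, 812, 816, 818]
def pvCCb : List Int := [3, 15, 19, 22, 26, 29, 36, 46, 56, 69, 83, 94, 96, 97, 701, 118, 122, 125, 131, 132, 136, 138, 145, 151, 155, 157, 162, 163, 270, 167, 168, 173, 178, 179, 195, 198, 180, 196, 197, 202, 220, 229, 241, 252, 280, 811, 815, 822, 103, 821, 825, 269, 284, 285, 288, 289, 702]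
def pvSJb : List Int := [27, 42, 60, 68, 88, 121, 154, 177, 204, 206, 255, 801, 826]
def pvPGb : List Int := [6, 54, 107, 114, 126, 150, 159, 171, 205, 253, 265, 266, 808, 817]
def pvJBb : List Int := [7, 37, 52, 59, 61, 79, 89, 105, 110, 147, 174, 176, 216, 217, 222, 286, 804, 805, 287, 290]
def pvKL2b : List Int := [20, 25, 43, 78, 81, 92, 109, 127, 133, 135, 153, 199, 201, 203, 221, 240, 250, 268, 814, 820]

-- CACBRCH_MAP (a dict iterated in insertion order)
def pvCACBRCH_MAP : List (String × List Int) :=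
  [("KL", pvKLb), ("CC", pvCCb), ("SJ", pvSJb), ("PG", pvPGb), ("JB", pvJBb), ("KL2", pvKL2b)]

-- A's for-loop with early return: if the matched key hit none of the elif arms
-- Python would fall through to the next iteration, hence the final recursive call.
def pvFormatLoop (items : List (String × List Int)) (branch_code : Int) : String :=
  match items with
  | [] => "NON CAC"
  | (key, branches) :: rest =>
    if branches.contains branch_code then
      if key == "KL" then "CAC-K. LUMPUR "
      else if key == "CC" then "CAC-CITY CENTRE"
      else if key == "SJ" then "CAC-BUTTERWOTH"
      else if key == "PG" then "CAC-PENANG"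
      else if key == "JB" then "CAC-JOHOR BAHRU"
      else if key == "KL2" then "CAC-KELANG"
      else pvFormatLoop rest branch_code
    else pvFormatLoop rest branch_code

def format_cacname (branch_code : Int) : String :=
  pvFormatLoop pvCACBRCH_MAP branch_code

-- ===== PORT B =====
-- Source B's module constant BRANCH_CAC: one flat literal dict, code -> CAC name
def pvBRANCH_CAC : PySem.Dict Int String := PySem.Dict.mk [
  (2, "CAC-K. LUMPUR "), (18, "CAC-K. LUMPUR "), (35, "CAC-K. LUMPUR "), (38, "CAC-K. LUMPUR "),
  (40, "CAC-K. LUMPUR "), (41, "CAC-K. LUMPUR "), (53, "CAC-K. LUMPUR "),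
  (66, "CAC-K. LUMPUR "), (120, "CAC-K. LUMPUR "), (124, "CAC-K. LUMPUR "),
  (128, "CAC-K. LUMPUR "), (129, "CAC-K. LUMPUR "), (141, "CAC-K. LUMPUR "),
  (148, "CAC-K. LUMPUR "), (169, "CAC-K. LUMPUR "), (170, "CAC-K. LUMPUR "),
  (225, "CAC-K. LUMPUR "), (226, "CAC-K. LUMPUR "), (230, "CAC-K. LUMPUR "),
  (232, "CAC-K. LUMPUR "), (236, "CAC-K. LUMPUR "), (248, "CAC-K. LUMPUR "),
  (262, "CAC-K. LUMPUR "), (267, "CAC-K. LUMPUR "), (802, "CAC-K. LUMPUR "),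
  (812, "CAC-K. LUMPUR "), (816, "CAC-K. LUMPUR "), (818, "CAC-K. LUMPUR "),
  (3, "CAC-CITY CENTRE"), (15, "CAC-CITY CENTRE"), (19, "CAC-CITY CENTRE"),
  (22, "CAC-CITY CENTRE"), (26, "CAC-CITY CENTRE"), (29, "CAC-CITY CENTRE"),
  (36, "CAC-CITY CENTRE"), (46, "CAC-CITY CENTRE"), (56, "CAC-CITY CENTRE"),
  (69, "CAC-CITY CENTRE"), (83, "CAC-CITY CENTRE"), (94, "CAC-CITY CENTRE"),
  (96, "CAC-CITY CENTRE"), (97, "CAC-CITY CENTRE"), (701, "CAC-CITY CENTRE"),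
  (118, "CAC-CITY CENTRE"), (122, "CAC-CITY CENTRE"), (125, "CAC-CITY CENTRE"),
  (131, "CAC-CITY CENTRE"), (132, "CAC-CITY CENTRE"), (136, "CAC-CITY CENTRE"),
  (138, "CAC-CITY CENTRE"), (145, "CAC-CITY CENTRE"), (151, "CAC-CITY CENTRE"),
  (155, "CAC-CITY CENTRE"), (157, "CAC-CITY CENTRE"), (162, "CAC-CITY CENTRE"),
  (163, "CAC-CITY CENTRE"), (270, "CAC-CITY CENTRE"), (167, "CAC-CITY CENTRE"),
  (168, "CAC-CITY CENTRE"), (173, "CAC-CITY CENTRE"), (178, "CAC-CITY CENTRE"),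
  (179, "CAC-CITY CENTRE"), (195, "CAC-CITY CENTRE"), (198, "CAC-CITY CENTRE"),
  (180, "CAC-CITY CENTRE"), (196, "CAC-CITY CENTRE"), (197, "CAC-CITY CENTRE"),
  (202, "CAC-CITY CENTRE"), (220, "CAC-CITY CENTRE"), (229, "CAC-CITY CENTRE"),
  (241, "CAC-CITY CENTRE"), (252, "CAC-CITY CENTRE"), (280, "CAC-CITY CENTRE"),
  (811, "CAC-CITY CENTRE"), (815, "CAC-CITY CENTRE"), (822, "CAC-CITY CENTRE"),
  (103, "CAC-CITY CENTRE"), (821, "CAC-CITY CENTRE"), (825, "CAC-CITY CENTRE"),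
  (269, "CAC-CITY CENTRE"), (284, "CAC-CITY CENTRE"), (285, "CAC-CITY CENTRE"),
  (288, "CAC-CITY CENTRE"), (289, "CAC-CITY CENTRE"), (702, "CAC-CITY CENTRE"),
  (27, "CAC-BUTTERWOTH"), (42, "CAC-BUTTERWOTH"), (60, "CAC-BUTTERWOTH"),
  (68, "CAC-BUTTERWOTH"), (88, "CAC-BUTTERWOTH"), (121, "CAC-BUTTERWOTH"),
  (154, "CAC-BUTTERWOTH"), (177, "CAC-BUTTERWOTH"), (204, "CAC-BUTTERWOTH"),
  (206, "CAC-BUTTERWOTH"), (255, "CAC-BUTTERWOTH"), (801, "CAC-BUTTERWOTH"),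
  (826, "CAC-BUTTERWOTH"), (6, "CAC-PENANG"), (54, "CAC-PENANG"), (107, "CAC-PENANG"),
  (114, "CAC-PENANG"), (126, "CAC-PENANG"), (150, "CAC-PENANG"), (159, "CAC-PENANG"),
  (171, "CAC-PENANG"), (205, "CAC-PENANG"), (253, "CAC-PENANG"), (265, "CAC-PENANG"),
  (266, "CAC-PENANG"), (808, "CAC-PENANG"), (817, "CAC-PENANG"), (7, "CAC-JOHOR BAHRU"),
  (37, "CAC-JOHOR BAHRU"), (52, "CAC-JOHOR BAHRU"), (59, "CAC-JOHOR BAHRU"),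
  (61, "CAC-JOHOR BAHRU"), (79, "CAC-JOHOR BAHRU"), (89, "CAC-JOHOR BAHRU"),
  (105, "CAC-JOHOR BAHRU"), (110, "CAC-JOHOR BAHRU"), (147, "CAC-JOHOR BAHRU"),
  (174, "CAC-JOHOR BAHRU"), (176, "CAC-JOHOR BAHRU"), (216, "CAC-JOHOR BAHRU"),
  (217, "CAC-JOHOR BAHRU"), (222, "CAC-JOHOR BAHRU"), (286, "CAC-JOHOR BAHRU"),
  (804, "CAC-JOHOR BAHRU"), (805, "CAC-JOHOR BAHRU"), (287, "CAC-JOHOR BAHRU"),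
  (290, "CAC-JOHOR BAHRU"), (20, "CAC-KELANG"), (25, "CAC-KELANG"), (43, "CAC-KELANG"),
  (78, "CAC-KELANG"), (81, "CAC-KELANG"), (92, "CAC-KELANG"), (109, "CAC-KELANG"),
  (127, "CAC-KELANG"), (133, "CAC-KELANG"), (135, "CAC-KELANG"), (153, "CAC-KELANG"),
  (199, "CAC-KELANG"), (201, "CAC-KELANG"), (203, "CAC-KELANG"), (221, "CAC-KELANG"),
  (240, "CAC-KELANG"), (250, "CAC-KELANG"), (268, "CAC-KELANG"), (814, "CAC-KELANG"),
  (820, "CAC-KELANG")]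

def format_cacname_alt (branch_code : Int) : String :=
  pvBRANCH_CAC.getD branch_code "NON CAC"

-- ===== PRECONDITION & SPEC =====
def Spec_format_cacname (branch_code : Int) (out : String) : Prop := out = format_cacname_alt branch_code
instance (branch_code : Int) (out : String) : Decidable (Spec_format_cacname branch_code out) := by unfold Spec_format_cacname; infer_instance

-- ===== CLAIM (what is proved, stated in full; the proofs are below) =====
def Claim_equal_format_cacname : Prop := ∀ (branch_code : Int), Dom_format_cacname branch_code → Spec_format_cacname branch_code (format_cacname branch_code)

-- ===== LEMMAS AND PROOFS =====

-- first-match lookup in a Dict literal is List.lookup on its item list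
theorem get?_mk_eq_lookup (l : List (Int × String)) (x : Int) :
    (PySem.Dict.mk l).get? x = l.lookup x := by
  induction l with
  | nil => simp [PySem.Dict.get?, List.lookup]
  | cons p l ih =>
    obtain ⟨k, v⟩ := p
    rw [PySem.Dict.get?_mk_cons, List.lookup, ih]
    by_cases h : x = k
    · simp [h]
    · simp [(by simpa using Ne.symm h : (k == x) = false), (by simpa using h : (x == k) = false)]

theorem lookup_append (l₁ l₂ : List (Int × String)) (x : Int) :
    (l₁ ++ l₂).lookup x = (l₁.lookup x).or (l₂.lookup x) := by
  induction l₁ with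
  | nil => simp
  | cons p l ih =>
    obtain ⟨k, v⟩ := p
    rw [List.cons_append, List.lookup, List.lookup, ih]
    split <;> simp_all

-- one group of the flat table: constant value over a code list
theorem lookup_map_const (codes : List Int) (s : String) (x : Int) :
    ((codes.map (fun c => (c, s))).lookup x) = if x ∈ codes then some s else none := by
  induction codes with
  | nil => simp
  | cons c codes ih =>
    rw [List.map_cons, List.lookup, ih]
    by_cases h : x = c
    · simp [h]
    · simp [h, (by simpa using h : (x == c) = false)]

-- the flat literal item list IS the six groups concatenated in A's scan order
theorem pairs_split :
    pvBRANCH_CAC.items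
      = pvKLb.map (fun c => (c, "CAC-K. LUMPUR ")) ++ pvCCb.map (fun c => (c, "CAC-CITY CENTRE"))
        ++ pvSJb.map (fun c => (c, "CAC-BUTTERWOTH")) ++ pvPGb.map (fun c => (c, "CAC-PENANG"))
        ++ pvJBb.map (fun c => (c, "CAC-JOHOR BAHRU")) ++ pvKL2b.map (fun c => (c, "CAC-KELANG")) := by
  decide

theorem mk_items (d : PySem.Dict Int String) : PySem.Dict.mk d.items = d := rfl

theorem alt_char (n : Int) :
    format_cacname_alt n
      = if n ∈ pvKLb then "CAC-K. LUMPUR "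
        else if n ∈ pvCCb then "CAC-CITY CENTRE"
        else if n ∈ pvSJb then "CAC-BUTTERWOTH"
        else if n ∈ pvPGb then "CAC-PENANG"
        else if n ∈ pvJBb then "CAC-JOHOR BAHRU"
        else if n ∈ pvKL2b then "CAC-KELANG"
        else "NON CAC" := by
  unfold format_cacname_alt
  rw [PySem.Dict.getD_eq_get?_getD, ← mk_items pvBRANCH_CAC, get?_mk_eq_lookup, pairs_split]
  rw [lookup_append, lookup_append, lookup_append, lookup_append, lookup_append]
  rw [lookup_map_const, lookup_map_const, lookup_map_const, lookup_map_const,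
      lookup_map_const, lookup_map_const]
  by_cases h1 : n ∈ pvKLb <;> by_cases h2 : n ∈ pvCCb <;> by_cases h3 : n ∈ pvSJb <;>
    by_cases h4 : n ∈ pvPGb <;> by_cases h5 : n ∈ pvJBb <;> by_cases h6 : n ∈ pvKL2b <;>
    simp [h1, h2, h3, h4, h5, h6]

-- ===== VERDICT (by name: the statement is the Claim_ definition above) =====
theorem format_cacname_spec : Claim_equal_format_cacname := by
  unfold Claim_equal_format_cacname
  intro n _
  show pvFormatLoop pvCACBRCH_MAP n = format_cacname_alt n
  rw [alt_char]
  unfold pvCACBRCH_MAP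
  simp only [pvFormatLoop]
  norm_num [List.contains_eq_mem]
  simp
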